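-- pv_equiv track=rewrite | github.com/sx-phughes/accounting | payables/APDatabase.py | check_for_two_tables
-- ===== SOURCE A (Python) =====
-- invoices_cols = (
--     "id",
--     "date_added",
--     "vendor",
--     "inv_num",
--     "amount",
--     "ym",
--     "cc",
--     "cc_user",
--     "approved",
--     "paid",
--     "date_paid",
-- )
--
-- def check_for_two_tables(cols: list[str]) -> bool:
--     """Returns True if columns span both invoices and vendors tables, false
--     otherwise"""
--
--     count_invoices = 0
--     count_vendors = 0
--     for col in cols:
--         if col == "vendor":
--             continue
--         elif col in invoices_cols:
--             count_invoices += 1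
--         else:
--             count_vendors += 1
--
--     if count_vendors > 0 and count_invoices > 0:
--         return True
--     else:
--         return False
-- ===== SOURCE B (Python) =====
-- invoices_cols = (
--     "id",
--     "date_added",
--     "vendor",
--     "inv_num",
--     "amount",
--     "ym",
--     "cc",
--     "cc_user",
--     "approved",
--     "paid",
--     "date_paid",
-- )
--
-- def check_for_two_tables(cols: list[str]) -> bool:
--     """Returns True if columns span both invoices and vendors tables, false
--     otherwise"""
--     s = set(cols)
--     inv = set(invoices_cols)
--     return bool((s & inv) - {"vendor"}) and bool(s - inv)
-- ===== Notes on version B (the rewrite author's own statement) =====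
-- stated objective: idiomatic
-- what changed: Replaced the per-element classification loop with two integer counters by set operations: one set built from cols, intersected/differenced against the invoices-column set (dropping 'vendor' on the invoice side), then a conjunction of two non-emptiness tests.
import Mathlib
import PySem

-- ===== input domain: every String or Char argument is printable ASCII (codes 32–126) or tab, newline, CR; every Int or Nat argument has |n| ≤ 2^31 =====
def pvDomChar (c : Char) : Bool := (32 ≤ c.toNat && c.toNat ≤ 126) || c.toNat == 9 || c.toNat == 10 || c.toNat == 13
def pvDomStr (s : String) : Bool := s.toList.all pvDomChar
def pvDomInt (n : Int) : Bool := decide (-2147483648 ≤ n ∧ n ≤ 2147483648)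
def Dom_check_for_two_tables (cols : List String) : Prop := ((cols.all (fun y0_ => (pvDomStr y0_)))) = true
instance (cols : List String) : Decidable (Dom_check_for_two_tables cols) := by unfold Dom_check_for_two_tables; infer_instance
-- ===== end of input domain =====

-- B replaces A's classification loop with counters by set intersection/difference and two non-emptiness tests (idiomatic rewrite, same results).


-- ===== PORT A =====
def invoicesColsA : List String :=
  ["id", "date_added", "vendor", "inv_num", "amount", "ym", "cc", "cc_user",
   "approved", "paid", "date_paid"]

def check_for_two_tables (cols : List String) : Bool :=
  let counts : Int × Int := cols.foldl (fun (p : Int × Int) col =>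
    if col == "vendor" then p
    else if invoicesColsA.contains col then (p.1 + 1, p.2)
    else (p.1, p.2 + 1)) (0, 0)
  if counts.2 > 0 ∧ counts.1 > 0 then true else false

-- ===== PORT B =====
def invoicesColsB : List String :=
  ["id", "date_added", "vendor", "inv_num", "amount", "ym", "cc", "cc_user",
   "approved", "paid", "date_paid"]

def check_for_two_tables_alt (cols : List String) : Bool :=
  let s : PySem.Set String := PySem.Set.ofList cols
  let inv : PySem.Set String := PySem.Set.ofList invoicesColsB
  !(PySem.Set.diff (PySem.Set.inter s inv) (PySem.Set.ofList ["vendor"])).isEmpty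
    && !(PySem.Set.diff s inv).isEmpty

-- ===== PRECONDITION & SPEC =====
def Spec_check_for_two_tables (cols : List String) (out : Bool) : Prop := out = check_for_two_tables_alt cols
instance (cols : List String) (out : Bool) : Decidable (Spec_check_for_two_tables cols out) := by unfold Spec_check_for_two_tables; infer_instance

-- ===== CLAIM (what is proved, stated in full; the proofs are below) =====
def Claim_equal_check_for_two_tables : Prop := ∀ (cols : List String), Dom_check_for_two_tables cols → Spec_check_for_two_tables cols (check_for_two_tables cols)

-- ===== LEMMAS AND PROOFS =====

-- Shorthands for the two classification predicates (proof-only helpers).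
def pInv (c : String) : Bool := !(c == "vendor") && invoicesColsA.contains c
def pVen (c : String) : Bool := !(c == "vendor") && !(invoicesColsA.contains c)

-- A's fold just adds the two classification counts to the accumulator.
theorem colsAB : invoicesColsA = invoicesColsB := rfl

-- A's fold just adds the two classification counts to the accumulator.
theorem foldA_eq (l : List String) (a b : Int) :
    l.foldl (fun (p : Int × Int) col =>
      if col == "vendor" then p
      else if invoicesColsA.contains col then (p.1 + 1, p.2)
      else (p.1, p.2 + 1)) (a, b)
    = (a + ((l.filter pInv).length : Int), b + ((l.filter pVen).length : Int)) := by
  induction l generalizing a b with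
  | nil => simp
  | cons x xs ih =>
    rw [List.foldl_cons]
    by_cases hv : x = "vendor"
    · rw [if_pos (by simp [hv]), ih,
         List.filter_cons_of_neg (by simp [pInv, hv]),
         List.filter_cons_of_neg (by simp [pVen, hv])]
    · by_cases hi : invoicesColsA.contains x = true
      · rw [if_neg (by simp [hv]), if_pos hi, ih,
           List.filter_cons_of_pos (by simp [pInv, hv]; simpa using hi),
           List.filter_cons_of_neg (by simp [pVen, hv]; simpa using hi)]
        simp only [Prod.mk.injEq, List.length_cons]
        exact ⟨by omega, trivial⟩
      · rw [if_neg (by simp [hv]), if_neg hi, ih,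
           List.filter_cons_of_neg (by simp [pInv, hv]; simpa using hi),
           List.filter_cons_of_pos (by simp [pVen, hv]; simpa using hi)]
        simp only [Prod.mk.injEq, List.length_cons]
        exact ⟨trivial, by omega⟩

-- A returns the conjunction of two existence tests.
theorem A_iff (cols : List String) :
    check_for_two_tables cols = true ↔
      ((∃ c ∈ cols, pVen c) ∧ (∃ c ∈ cols, pInv c)) := by
  unfold check_for_two_tables
  rw [foldA_eq]
  simp only [zero_add]
  constructor
  · intro h
    split at h
    case isTrue hc =>
      obtain ⟨h2, h1⟩ := hc
      have l2 : 0 < (cols.filter pVen).length := by omega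
      have l1 : 0 < (cols.filter pInv).length := by omega
      rw [List.length_pos_iff_exists_mem] at l2 l1
      obtain ⟨c2, hc2⟩ := l2
      obtain ⟨c1, hc1⟩ := l1
      rw [List.mem_filter] at hc2 hc1
      exact ⟨⟨c2, hc2.1, hc2.2⟩, ⟨c1, hc1.1, hc1.2⟩⟩
    case isFalse => simp at h
  · rintro ⟨⟨c2, hm2, hp2⟩, ⟨c1, hm1, hp1⟩⟩
    have l2 : 0 < (cols.filter pVen).length :=
      List.length_pos_iff_exists_mem.mpr ⟨c2, List.mem_filter.mpr ⟨hm2, hp2⟩⟩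
    have l1 : 0 < (cols.filter pInv).length :=
      List.length_pos_iff_exists_mem.mpr ⟨c1, List.mem_filter.mpr ⟨hm1, hp1⟩⟩
    rw [if_pos ⟨by omega, by omega⟩]

-- B returns the conjunction of the same two existence tests.
theorem B_iff (cols : List String) :
    check_for_two_tables_alt cols = true ↔
      ((∃ c ∈ cols, pVen c) ∧ (∃ c ∈ cols, pInv c)) := by
  unfold check_for_two_tables_alt
  simp only [Bool.and_eq_true, Bool.not_eq_true', List.isEmpty_eq_false_iff_exists_mem]
  constructor
  · rintro ⟨⟨c1, h1⟩, ⟨c2, h2⟩⟩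
    rw [PySem.Set.mem_diff, PySem.Set.mem_inter] at h1
    rw [PySem.Set.mem_diff] at h2
    simp only [PySem.Set.mem_ofList, List.mem_singleton] at h1 h2
    refine ⟨⟨c2, h2.1, ?_⟩, ⟨c1, h1.1.1, ?_⟩⟩
    · have hv2 : c2 ≠ "vendor" := by
        intro hc; apply h2.2; rw [hc]; simp [invoicesColsB]
      simp [pVen, hv2]
      simpa [invoicesColsA, invoicesColsB] using h2.2
    · simp [pInv, h1.2]
      simpa [invoicesColsA, invoicesColsB] using h1.1.2
  · rintro ⟨⟨c2, hm2, hp2⟩, ⟨c1, hm1, hp1⟩⟩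
    simp only [pVen, pInv, Bool.and_eq_true, Bool.not_eq_true', beq_eq_false_iff_ne,
      Bool.not_eq_eq_eq_not, Bool.not_true, decide_eq_false_iff_not] at hp2 hp1
    constructor
    · refine ⟨c1, ?_⟩
      rw [PySem.Set.mem_diff, PySem.Set.mem_inter]
      simp only [PySem.Set.mem_ofList, List.mem_singleton]
      refine ⟨⟨hm1, ?_⟩, hp1.1⟩
      simpa [invoicesColsA, invoicesColsB] using hp1.2
    · refine ⟨c2, ?_⟩
      rw [PySem.Set.mem_diff]
      simp only [PySem.Set.mem_ofList]
      refine ⟨hm2, ?_⟩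
      intro hmem
      have hnc : c2 ∉ invoicesColsA := by simpa using hp2.2
      apply hnc
      rw [colsAB]
      exact hmem

-- ===== VERDICT (by name: the statement is the Claim_ definition above) =====
theorem check_for_two_tables_spec : Claim_equal_check_for_two_tables := by
  intro cols _
  unfold Spec_check_for_two_tables
  have h := (A_iff cols).trans (B_iff cols).symm
  cases hA : check_for_two_tables cols <;> cases hB : check_for_two_tables_alt cols <;> simp_all
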